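-- pv_equiv track=rewrite | github.com/angyonghaseyo/Healthier365 | app.py | format_meal_plan
-- ===== SOURCE A (Python) =====
-- def format_meal_plan(plan):
--     """Format the meal plan into a structured daily schedule"""
--     formatted_plan = []
--     current_section = []
--
--     for line in plan.split('\n'):
--         line = line.strip()
--         if not line:
--             if current_section:
--                 formatted_plan.append('\n'.join(current_section))
--                 current_section = []
--         else:
--             if any(time_marker in line.lower() for time_marker in ['breakfast', 'lunch', 'dinner', 'snack']):
--                 if current_section:
--                     formatted_plan.append('\n'.join(current_section))
--                     current_section = []
--             current_section.append(line)
--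
--     if current_section:
--         formatted_plan.append('\n'.join(current_section))
--
--     return '\n\n'.join(formatted_plan)
-- ===== SOURCE B (Python) =====
-- def format_meal_plan(plan):
--     """Format the meal plan into a structured daily schedule"""
--     markers = ['breakfast', 'lunch', 'dinner', 'snack']
--     # pass 1: stripped non-empty lines, each tagged with whether a blank preceded it
--     items = []
--     gap = False
--     for raw in plan.split('\n'):
--         line = raw.strip()
--         if line:
--             items.append((line, gap))
--             gap = False
--         else:
--             gap = True
--     # pass 2: group into sections
--     sections = []
--     for line, gap in items:
--         if sections and (gap or any(m in line.lower() for m in markers)):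
--             sections.append([line])
--         elif sections:
--             sections[-1].append(line)
--         else:
--             sections.append([line])
--     return '\n\n'.join('\n'.join(s) for s in sections)
-- ===== Notes on version B (the rewrite author's own statement) =====
-- stated objective: alternative
-- what changed: Replaces A's single interleaved flush-on-blank state machine with a two-pass decomposition: first build a list of (line, preceded-by-blank) pairs, then group that list into sections with a single boundary test.
import Mathlib
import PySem

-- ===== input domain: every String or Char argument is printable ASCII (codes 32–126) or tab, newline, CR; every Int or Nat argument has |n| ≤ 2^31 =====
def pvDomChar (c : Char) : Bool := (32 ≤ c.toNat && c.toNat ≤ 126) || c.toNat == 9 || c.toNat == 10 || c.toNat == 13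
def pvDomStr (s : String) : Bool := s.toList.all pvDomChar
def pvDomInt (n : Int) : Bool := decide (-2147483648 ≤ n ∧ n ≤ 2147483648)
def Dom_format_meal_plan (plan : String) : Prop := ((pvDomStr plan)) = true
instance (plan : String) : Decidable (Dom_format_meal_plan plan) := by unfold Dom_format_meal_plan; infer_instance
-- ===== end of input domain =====

-- B replaces A's interleaved flush-on-blank state machine by a two-pass decomposition
-- (tag non-empty lines with a preceded-by-blank flag, then group); objective: alternative.

-- ===== PORT A =====
def fmpHasMarker (line : String) : Bool :=
  (["breakfast", "lunch", "dinner", "snack"]).any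
    (fun time_marker => PySem.Str.isIn time_marker (PySem.Str.lower line))

def fmpStepA (st : List String × List String) (raw : String) : List String × List String :=
  let line := PySem.Str.strip raw
  if line = "" then
    if st.2 ≠ [] then (st.1 ++ [PySem.Str.join "\n" st.2], []) else st
  else
    let st' :=
      if fmpHasMarker line = true ∧ st.2 ≠ [] then
        (st.1 ++ [PySem.Str.join "\n" st.2], ([] : List String))
      else st
    (st'.1, st'.2 ++ [line])

def format_meal_plan (plan : String) : String :=
  -- plan.split('\n'): sep is the non-empty literal "\n", so split? is always some
  let st := ((PySem.Str.split? plan "\n").getD []).foldl fmpStepA ([], [])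
  let fp := if st.2 ≠ [] then st.1 ++ [PySem.Str.join "\n" st.2] else st.1
  PySem.Str.join "\n\n" fp

-- ===== PORT B =====
-- pass 1: stripped non-empty lines tagged with whether a blank line preceded them
def fmpStep1 (st : List (String × Bool) × Bool) (raw : String) : List (String × Bool) × Bool :=
  let line := PySem.Str.strip raw
  if line ≠ "" then (st.1 ++ [(line, st.2)], false) else (st.1, true)

-- pass 2: group tagged lines into sections (sections[-1].append = rebuild last element)
def fmpStep2 (sections : List (List String)) (item : String × Bool) : List (List String) :=
  if sections ≠ [] ∧ (item.2 = true ∨ fmpHasMarker item.1 = true) then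
    sections ++ [[item.1]]
  else if sections ≠ [] then
    sections.dropLast ++ [sections.getLastD [] ++ [item.1]]
  else [[item.1]]

def format_meal_plan_alt (plan : String) : String :=
  let items := (((PySem.Str.split? plan "\n").getD []).foldl fmpStep1 ([], false)).1
  let sections := items.foldl fmpStep2 []
  PySem.Str.join "\n\n" (sections.map (fun s => PySem.Str.join "\n" s))

-- ===== PRECONDITION & SPEC =====
def Spec_format_meal_plan (plan : String) (out : String) : Prop := out = format_meal_plan_alt plan
instance (plan : String) (out : String) : Decidable (Spec_format_meal_plan plan out) := by unfold Spec_format_meal_plan; infer_instance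

-- ===== CLAIM (what is proved, stated in full; the proofs are below) =====
def Claim_equal_format_meal_plan : Prop := ∀ (plan : String), Dom_format_meal_plan plan → Spec_format_meal_plan plan (format_meal_plan plan)

-- ===== LEMMAS AND PROOFS =====

-- fused version of B's two passes (proof device only)
def fmpFStep (st : List (List String) × Bool) (raw : String) : List (List String) × Bool :=
  let line := PySem.Str.strip raw
  if line ≠ "" then (fmpStep2 st.1 (line, st.2), false) else (st.1, true)

theorem fmp_fuse (lines : List String) (st : List (String × Bool) × Bool) :
    lines.foldl fmpFStep (st.1.foldl fmpStep2 [], st.2)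
      = (((lines.foldl fmpStep1 st).1).foldl fmpStep2 [], (lines.foldl fmpStep1 st).2) := by
  induction lines generalizing st with
  | nil => rfl
  | cons raw ls ih =>
    simp only [List.foldl_cons]
    by_cases h : PySem.Str.strip raw = ""
    · have h1 : fmpStep1 st raw = (st.1, true) := by simp [fmpStep1, h]
      have h2 : fmpFStep (st.1.foldl fmpStep2 [], st.2) raw = (st.1.foldl fmpStep2 [], true) := by
        simp [fmpFStep, h]
      rw [h1, h2]; exact ih (st.1, true)
    · have h1 : fmpStep1 st raw = (st.1 ++ [(PySem.Str.strip raw, st.2)], false) := by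
        simp [fmpStep1, h]
      have h2 : fmpFStep (st.1.foldl fmpStep2 [], st.2) raw
          = ((st.1 ++ [(PySem.Str.strip raw, st.2)]).foldl fmpStep2 [], false) := by
        simp [fmpFStep, h, List.foldl_append]
      rw [h1, h2]; exact ih (st.1 ++ [(PySem.Str.strip raw, st.2)], false)

-- the invariant relating A's state (fp, cs) to the fused B state (secs, gap)
def fmpInv (fp cs : List String) (secs : List (List String)) (gap : Bool) : Prop :=
  (cs = [] → fp = secs.map (PySem.Str.join "\n") ∧ (secs ≠ [] → gap = true))
  ∧ (cs ≠ [] → gap = false ∧ ∃ pre, secs = pre ++ [cs] ∧ fp = pre.map (PySem.Str.join "\n"))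

theorem fmp_inv_step (lines : List String) (fp cs : List String)
    (secs : List (List String)) (gap : Bool) (hinv : fmpInv fp cs secs gap) :
    fmpInv (lines.foldl fmpStepA (fp, cs)).1 (lines.foldl fmpStepA (fp, cs)).2
      (lines.foldl fmpFStep (secs, gap)).1 (lines.foldl fmpFStep (secs, gap)).2 := by
  induction lines generalizing fp cs secs gap with
  | nil => exact hinv
  | cons raw ls ih =>
    simp only [List.foldl_cons]
    obtain ⟨hemp, hne⟩ := hinv
    by_cases h : PySem.Str.strip raw = ""
    · have hB : fmpFStep (secs, gap) raw = (secs, true) := by simp [fmpFStep, h]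
      rw [hB]
      by_cases hcs : cs = []
      · have hA : fmpStepA (fp, cs) raw = (fp, cs) := by simp [fmpStepA, h, hcs]
        rw [hA]
        exact ih fp cs secs true ⟨fun _ => ⟨(hemp hcs).1, fun _ => rfl⟩, fun hc => absurd hcs hc⟩
      · obtain ⟨-, pre, hsecs, hfp⟩ := hne hcs
        have hA : fmpStepA (fp, cs) raw = (fp ++ [PySem.Str.join "\n" cs], []) := by
          simp [fmpStepA, h, hcs]
        rw [hA]
        refine ih _ _ _ _ ⟨fun _ => ⟨?_, fun _ => rfl⟩, fun hc => absurd rfl hc⟩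
        simp [hsecs, hfp]
    · have hB : fmpFStep (secs, gap) raw = (fmpStep2 secs (PySem.Str.strip raw, gap), false) := by
        simp [fmpFStep, h]
      rw [hB]
      by_cases hcs : cs = []
      · have hA : fmpStepA (fp, cs) raw = (fp, cs ++ [PySem.Str.strip raw]) := by
          simp [fmpStepA, h, hcs]
        rw [hA]
        obtain ⟨hfp, hgap⟩ := hemp hcs
        by_cases hs : secs = []
        · have h2 : fmpStep2 secs (PySem.Str.strip raw, gap) = [[PySem.Str.strip raw]] := by
            simp [fmpStep2, hs]
          rw [h2]
          exact ih _ _ _ _ ⟨fun hc => by simp [hcs] at hc,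
            fun _ => ⟨rfl, [], by simp [hcs], by simp [hfp, hs]⟩⟩
        · have h2 : fmpStep2 secs (PySem.Str.strip raw, gap) = secs ++ [[PySem.Str.strip raw]] := by
            simp [fmpStep2, hs, hgap hs]
          rw [h2]
          exact ih _ _ _ _ ⟨fun hc => by simp [hcs] at hc,
            fun _ => ⟨rfl, secs, by simp [hcs], by simp [hfp]⟩⟩
      · obtain ⟨hgap, pre, hsecs, hfp⟩ := hne hcs
        have hsne : secs ≠ [] := by simp [hsecs]
        by_cases hm : fmpHasMarker (PySem.Str.strip raw) = true
        · have hA : fmpStepA (fp, cs) raw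
              = (fp ++ [PySem.Str.join "\n" cs], [PySem.Str.strip raw]) := by
            simp [fmpStepA, h, hcs, hm]
          have h2 : fmpStep2 secs (PySem.Str.strip raw, gap) = secs ++ [[PySem.Str.strip raw]] := by
            simp [fmpStep2, hsne, hm]
          rw [hA, h2]
          refine ih _ _ _ _ ⟨fun hc => by simp at hc, fun _ => ⟨rfl, secs, rfl, ?_⟩⟩
          simp [hsecs, hfp]
        · have hA : fmpStepA (fp, cs) raw = (fp, cs ++ [PySem.Str.strip raw]) := by
            simp [fmpStepA, h, hcs, hm]
          have h2 : fmpStep2 secs (PySem.Str.strip raw, gap)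
              = pre ++ [cs ++ [PySem.Str.strip raw]] := by
            simp [fmpStep2, hm, hgap, hsecs, List.getLastD_eq_getLast?]
          rw [hA, h2]
          exact ih _ _ _ _ ⟨fun hc => by simp at hc, fun _ => ⟨rfl, pre, rfl, hfp⟩⟩

-- ===== VERDICT (by name: the statement is the Claim_ definition above) =====
theorem format_meal_plan_spec : Claim_equal_format_meal_plan := by
  intro plan _
  unfold Spec_format_meal_plan format_meal_plan format_meal_plan_alt
  set lines := (PySem.Str.split? plan "\n").getD [] with hl
  have hfuse := fmp_fuse lines (([] : List (String × Bool)), false)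
  have hinv := fmp_inv_step lines [] [] [] false
    ⟨fun _ => ⟨rfl, fun hc => absurd rfl hc⟩, fun hc => absurd rfl hc⟩
  simp only [List.foldl_nil] at hfuse
  rw [hfuse] at hinv
  obtain ⟨hemp, hne⟩ := hinv
  by_cases hcs : (lines.foldl fmpStepA ([], [])).2 = []
  · obtain ⟨hfp, -⟩ := hemp hcs
    simp [hcs, hfp]
  · obtain ⟨-, pre, hsecs, hfp⟩ := hne hcs
    dsimp only at hsecs
    simp [hcs, hfp, hsecs]
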